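-- pv_equiv track=rewrite | github.com/jemtca/CodingBat | Python/List-3/square_up.py | square_up
-- ===== SOURCE A (Python) =====
-- def square_up(n):
--     new_list = []
--     temp = 1
--     temp2 = n
--
--     for _ in range(n*n):
--         new_list.append(0)
--
--     index = len(new_list) - 1
--
--     i = 0
--     while i < n:
--         j = temp2
--         while j > 0:
--             new_list[index] = temp
--             index -= 1
--             temp += 1
--             j -= 1
--         temp = 1
--         temp2 -= 1
--         index = index - i
--         i += 1
--
--     return new_list
-- ===== SOURCE B (Python) =====
-- def square_up(n):
--     result = [0] * (n * n)
--     for i in range(n):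
--         for c in range(n - 1 - i, n):
--             result[i * n + c] = n - c
--     return result
-- ===== Notes on version B (the rewrite author's own statement) =====
-- stated objective: simpler
-- what changed: Replaces A's backward in-place fill (descending index with per-row skip arithmetic and a mutable counter state) by a direct forward fill: allocate [0]*(n*n) and write result[i*n+c] = n-c for each nonzero cell, computed from the row's zero-prefix boundary.
import Mathlib
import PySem

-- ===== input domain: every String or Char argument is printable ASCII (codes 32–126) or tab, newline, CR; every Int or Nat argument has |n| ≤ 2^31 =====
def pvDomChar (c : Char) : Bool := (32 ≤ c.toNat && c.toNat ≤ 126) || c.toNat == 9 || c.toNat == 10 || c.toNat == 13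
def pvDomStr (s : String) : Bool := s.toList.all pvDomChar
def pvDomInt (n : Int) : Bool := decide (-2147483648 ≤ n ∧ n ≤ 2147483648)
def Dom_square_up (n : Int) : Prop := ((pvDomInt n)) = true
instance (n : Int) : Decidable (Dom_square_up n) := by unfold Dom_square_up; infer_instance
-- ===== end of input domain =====

-- B replaces A's backward in-place fill with counter bookkeeping by a direct forward fill of
-- the nonzero cells of a preallocated zero grid (objective: simpler). Return value only; B does
-- not mutate any argument (neither does A's interface).

-- ===== PORT A =====
-- termination measures for the two while loops (cited by name in decreasing_by)
lemma pvDecInner {j : Int} (h : 0 < j) : (j - 1).toNat < j.toNat := by omega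
lemma pvDecOuter {i n : Int} (h : i < n) : (n - (i + 1)).toNat < (n - i).toNat := by omega

-- inner 'while j > 0' loop of A: state (new_list, index, temp), counts j down
def squareUpAInner (lst : List Int) (index temp j : Int) : List Int × Int × Int :=
  if h : 0 < j then
    squareUpAInner (PySem.List.pySetD lst index temp) (index - 1) (temp + 1) (j - 1)
  else (lst, index, temp)
termination_by j.toNat
decreasing_by exact pvDecInner h

-- outer 'while i < n' loop of A
def squareUpAOuter (lst : List Int) (index temp temp2 i n : Int) : List Int :=
  if h : i < n then
    squareUpAOuter (squareUpAInner lst index temp temp2).1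
      ((squareUpAInner lst index temp temp2).2.1 - i) 1 (temp2 - 1) (i + 1) n
  else lst
termination_by (n - i).toNat
decreasing_by exact pvDecOuter h

def square_up (n : Int) : List Int :=
  let new_list : List Int := (PySem.List.pyRange 0 (n*n) 1).foldl (fun acc _ => acc ++ [0]) []
  let index : Int := (new_list.length : Int) - 1
  squareUpAOuter new_list index 1 n 0 n

-- ===== PORT B =====
def square_up_alt (n : Int) : List Int :=
  let result : List Int := List.replicate (n*n).toNat 0   -- [0] * (n*n); n*n ≥ 0 always
  (PySem.List.pyRange 0 n 1).foldl (fun res i =>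
    (PySem.List.pyRange (n - 1 - i) n 1).foldl
      (fun r c => PySem.List.pySetD r (i*n + c) (n - c)) res) result

-- ===== PRECONDITION & SPEC =====
def Spec_square_up (n : Int) (out : List Int) : Prop := out = square_up_alt n
instance (n : Int) (out : List Int) : Decidable (Spec_square_up n out) := by unfold Spec_square_up; infer_instance

-- ===== CLAIM (what is proved, stated in full; the proofs are below) =====
def Claim_equal_square_up : Prop := ∀ (n : Int), Dom_square_up n → Spec_square_up n (square_up n)

-- ===== LEMMAS AND PROOFS =====

-- [v+k-1, v+k-2, ..., v] : the block a run of k writes with increasing value produces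
def descL : Int → Nat → List Int
  | _, 0 => []
  | v, k+1 => descL (v+1) k ++ [v]

lemma descL_cons (v : Int) (k : Nat) : descL v (k+1) = (v + k) :: descL v k := by
  induction k generalizing v with
  | zero => simp [descL]
  | succ k ih =>
    show descL (v+1) (k+1) ++ [v] = _
    rw [ih (v+1), show descL v (k+1) = descL (v+1) k ++ [v] from rfl]
    simp only [List.cons_append]
    congr 1
    push_cast
    ring

lemma descL_length (v : Int) (k : Nat) : (descL v k).length = k := by
  induction k generalizing v with
  | zero => rfl
  | succ k ih => simp [descL, ih]

-- row r (0-indexed from the top) of the n x n pattern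
def rowL (N r : Nat) : List Int := List.replicate (N - 1 - r) 0 ++ descL 1 (r+1)

def rowsL (N : Nat) : List Int := (List.range N).flatMap (rowL N)

lemma set_middle (pre : List Int) (x v : Int) (post : List Int) :
    (pre ++ x :: post).set pre.length v = pre ++ v :: post := by
  induction pre with
  | nil => rfl
  | cons a l ih => simpa [List.set] using ih

lemma zeros_build (l : List Int) (acc : List Int) :
    l.foldl (fun a (_ : Int) => a ++ [(0:Int)]) acc = acc ++ List.replicate l.length 0 := by
  induction l generalizing acc with
  | nil => simp
  | cons a l ih => simp [List.foldl, ih, List.replicate_succ]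

lemma aInner_spec : ∀ (t m : Nat) (temp : Int) (mid : List Int), t ≤ m →
    squareUpAInner (List.replicate m 0 ++ mid) ((m:Int) - 1) temp (t:Int) =
      (List.replicate (m - t) 0 ++ descL temp t ++ mid, (m:Int) - t - 1, temp + t) := by
  intro t
  induction t with
  | zero =>
    intro m temp mid _
    rw [squareUpAInner]
    simp [descL]
  | succ t ih =>
    intro m temp mid hm
    obtain ⟨k, rfl⟩ : ∃ k, m = k + 1 := ⟨m - 1, by omega⟩
    rw [squareUpAInner, dif_pos (show (0:Int) < ((t+1 : Nat) : Int) by push_cast; omega)]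
    rw [show ((k+1 : Nat):Int) - 1 = ((k : Nat) : Int) by push_cast; ring]
    have hset : PySem.List.pySetD (List.replicate (k+1) 0 ++ mid) ((k : Nat) : Int) temp
        = List.replicate k 0 ++ temp :: mid := by
      rw [PySem.List.pySetD_of_nonneg _ temp (Int.natCast_nonneg k), Int.toNat_natCast,
          List.replicate_succ', List.append_assoc]
      simpa using set_middle (List.replicate k (0:Int)) 0 temp mid
    rw [hset]
    rw [show ((t+1 : Nat):Int) - 1 = ((t : Nat) : Int) by push_cast; ring]
    rw [ih k (temp+1) (temp :: mid) (by omega)]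
    refine Prod.ext ?_ (Prod.ext ?_ ?_)
    · show List.replicate (k - t) 0 ++ descL (temp+1) t ++ temp :: mid
        = List.replicate (k + 1 - (t+1)) 0 ++ descL temp (t+1) ++ mid
      rw [show k + 1 - (t+1) = k - t by omega]
      rw [show descL temp (t+1) = descL (temp+1) t ++ [temp] from rfl]
      simp [List.append_assoc]
    · show ((k : Nat) : Int) - t - 1 = ((k+1:Nat):Int) - ((t+1:Nat):Int) - 1
      push_cast
      ring
    · show temp + 1 + t = temp + ((t+1:Nat):Int)
      push_cast
      ring

lemma aOuter_spec (n : Int) (hn : 0 < n) : ∀ (j : Nat), j ≤ n.toNat →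
    squareUpAOuter
      (List.replicate (j * n.toNat) 0 ++ ((List.range n.toNat).drop j).flatMap (rowL n.toNat))
      (((j * n.toNat : Nat) : Int) - 1) 1 (j:Int) (n - j) n = rowsL n.toNat := by
  intro j
  induction j with
  | zero =>
    intro _
    rw [squareUpAOuter, dif_neg (by omega)]
    simp [rowsL]
  | succ j ih =>
    intro hj
    set N := n.toNat with hN
    have hnN : n = (N:Int) := by omega
    have hN1 : 1 ≤ N := by omega
    rw [squareUpAOuter, dif_pos (show n - ((j+1:Nat):Int) < n by push_cast; omega)]
    have hinner := aInner_spec (j+1) ((j+1) * N) 1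
      (((List.range N).drop (j+1)).flatMap (rowL N))
      (Nat.le_mul_of_pos_right (j+1) (by omega))
    rw [hinner]
    have hdrop : (List.range N).drop j = j :: (List.range N).drop (j+1) := by
      rw [List.drop_eq_getElem_cons (by simpa using hj)]
      simp
    have hlist : List.replicate ((j+1) * N - (j+1)) (0:Int) ++ descL 1 (j+1)
          ++ ((List.range N).drop (j+1)).flatMap (rowL N)
        = List.replicate (j * N) 0 ++ ((List.range N).drop j).flatMap (rowL N) := by
      rw [hdrop, List.flatMap_cons]
      rw [show (j+1) * N - (j+1) = j * N + (N - 1 - j) by rw [Nat.succ_mul]; omega]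
      rw [List.replicate_add]
      simp only [rowL, List.append_assoc]
    have hidx : (((j+1) * N : Nat):Int) - ((j+1:Nat):Int) - 1 - (n - ((j+1:Nat):Int))
        = (((j * N : Nat)):Int) - 1 := by
      rw [hnN]
      push_cast
      ring
    have htemp2 : ((j+1:Nat):Int) - 1 = (j:Int) := by push_cast; ring
    have hi : n - ((j+1:Nat):Int) + 1 = n - (j:Int) := by push_cast; ring
    rw [hlist, hidx, htemp2, hi]
    exact ih (by omega)

lemma fillRow (i n : Int) : ∀ (d : Nat) (c0 : Int) (pre rest : List Int),
    (pre.length : Int) = i*n + c0 → c0 + d = n →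
    (PySem.List.pyRange c0 n 1).foldl
        (fun r c => PySem.List.pySetD r (i*n + c) (n - c))
        (pre ++ List.replicate d 0 ++ rest)
      = pre ++ descL 1 d ++ rest := by
  intro d
  induction d with
  | zero =>
    intro c0 pre rest _ hc
    rw [PySem.List.pyRange_one_eq_nil (by omega)]
    simp [descL]
  | succ d ih =>
    intro c0 pre rest hlen hc
    rw [PySem.List.pyRange_one_cons (show c0 < n by push_cast at hc; omega)]
    rw [List.foldl_cons]
    have hset : PySem.List.pySetD (pre ++ List.replicate (d+1) 0 ++ rest) (i*n + c0) (n - c0)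
        = (pre ++ [((d+1:Nat):Int)]) ++ List.replicate d 0 ++ rest := by
      rw [show i*n + c0 = ((pre.length : Nat) : Int) from hlen.symm]
      rw [PySem.List.pySetD_of_nonneg _ _ (Int.natCast_nonneg pre.length), Int.toNat_natCast]
      rw [List.replicate_succ, List.append_assoc, List.cons_append]
      rw [set_middle pre 0 (n - c0) (List.replicate d 0 ++ rest)]
      rw [show n - c0 = ((d+1:Nat):Int) by push_cast at hc ⊢; omega]
      simp
    rw [hset]
    rw [ih (c0+1) (pre ++ [((d+1:Nat):Int)]) rest
      (by simp only [List.length_append, List.length_cons, List.length_nil]; push_cast; omega)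
      (by push_cast at hc ⊢; omega)]
    rw [descL_cons, show (1 : Int) + ((d : Nat) : Int) = ((d+1:Nat):Int) by push_cast; ring]
    simp [List.append_assoc]

lemma rowsL_prefix_length (N : Nat) : ∀ i, i ≤ N →
    (((List.range i).flatMap (rowL N)).length) = i * N := by
  intro i
  induction i with
  | zero => simp
  | succ i ih =>
    intro hi
    rw [List.range_succ, List.flatMap_append, List.length_append, ih (by omega)]
    simp [rowL, descL_length]
    rw [Nat.succ_mul]
    omega

lemma bOuter_spec (n : Int) (hn : 0 < n) : ∀ (j i : Nat), i + j = n.toNat →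
    (PySem.List.pyRange (i:Int) n 1).foldl
        (fun res i =>
          (PySem.List.pyRange (n - 1 - i) n 1).foldl
            (fun r c => PySem.List.pySetD r (i*n + c) (n - c)) res)
        ((List.range i).flatMap (rowL n.toNat) ++ List.replicate (j * n.toNat) 0)
      = rowsL n.toNat := by
  intro j
  induction j with
  | zero =>
    intro i hi
    have hiN : i = n.toNat := by omega
    subst hiN
    rw [PySem.List.pyRange_one_eq_nil (by omega)]
    simp [rowsL]
  | succ j ih =>
    intro i hi
    set N := n.toNat with hN
    have hnN : n = (N:Int) := by omega
    have hiN : i < N := by omega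
    rw [PySem.List.pyRange_one_cons (show ((i:Nat):Int) < n by omega), List.foldl_cons]
    have hsplit : List.replicate ((j+1) * N) (0:Int)
        = List.replicate (N - 1 - i) 0 ++ List.replicate (i+1) 0 ++ List.replicate (j * N) 0 := by
      rw [← List.replicate_add, ← List.replicate_add]
      congr 1
      rw [Nat.succ_mul]
      omega
    rw [hsplit]
    rw [show (List.range i).flatMap (rowL N) ++ (List.replicate (N-1-i) (0:Int)
          ++ List.replicate (i+1) 0 ++ List.replicate (j*N) 0)
        = ((List.range i).flatMap (rowL N) ++ List.replicate (N-1-i) (0:Int))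
          ++ List.replicate (i+1) 0 ++ List.replicate (j*N) 0 by simp [List.append_assoc]]
    have hpre : ((((List.range i).flatMap (rowL N) ++ List.replicate (N - 1 - i) (0:Int)).length : Nat) : Int)
        = (i:Int) * n + (n - 1 - (i:Int)) := by
      rw [List.length_append, rowsL_prefix_length N i (by omega), List.length_replicate, hnN]
      push_cast
      omega
    rw [fillRow (i:Int) n (i+1) (n - 1 - (i:Int))
      ((List.range i).flatMap (rowL N) ++ List.replicate (N - 1 - i) 0)
      (List.replicate (j * N) 0) hpre (by push_cast; ring)]
    rw [show ((List.range i).flatMap (rowL N) ++ List.replicate (N-1-i) (0:Int))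
          ++ descL 1 (i+1) ++ List.replicate (j*N) 0
        = (List.range (i+1)).flatMap (rowL N) ++ List.replicate (j*N) 0 by
      rw [List.range_succ, List.flatMap_append]
      simp [rowL, List.append_assoc]]
    have h := ih (i+1) (by omega)
    rw [show ((i+1:Nat):Int) = ((i:Nat):Int) + 1 by push_cast; ring] at h
    exact h

lemma square_up_closed (n : Int) : square_up n =
    if 0 < n then rowsL n.toNat else List.replicate (n*n).toNat 0 := by
  unfold square_up
  rw [zeros_build]
  simp only [List.nil_append, PySem.List.length_pyRange_one, List.length_replicate, sub_zero]
  by_cases hn : 0 < n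
  · rw [if_pos hn]
    have hn0 : n = ((n.toNat : Nat) : Int) := by omega
    have hNN : (n*n).toNat = n.toNat * n.toNat := by
      conv_lhs => rw [hn0, ← Nat.cast_mul, Int.toNat_natCast]
    rw [hNN]
    have h := aOuter_spec n hn n.toNat (le_refl _)
    rw [show (List.range n.toNat).drop n.toNat = [] by simp] at h
    rw [List.flatMap_nil, List.append_nil] at h
    rw [show n - ((n.toNat : Nat) : Int) = 0 by omega] at h
    rw [show ((n.toNat : Nat) : Int) = n from hn0.symm] at h
    exact h
  · rw [if_neg hn]
    rw [squareUpAOuter, dif_neg (by omega)]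

lemma square_up_alt_closed (n : Int) : square_up_alt n =
    if 0 < n then rowsL n.toNat else List.replicate (n*n).toNat 0 := by
  unfold square_up_alt
  by_cases hn : 0 < n
  · rw [if_pos hn]
    have hn0 : n = ((n.toNat : Nat) : Int) := by omega
    have hNN : (n*n).toNat = n.toNat * n.toNat := by
      conv_lhs => rw [hn0, ← Nat.cast_mul, Int.toNat_natCast]
    rw [hNN]
    have h := bOuter_spec n hn n.toNat 0 (by omega)
    simpa using h
  · rw [if_neg hn]
    rw [PySem.List.pyRange_one_eq_nil (by omega)]
    rfl

-- ===== VERDICT (by name: the statement is the Claim_ definition above) =====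
theorem square_up_spec : Claim_equal_square_up := by
  intro n _
  show square_up n = square_up_alt n
  rw [square_up_closed, square_up_alt_closed]
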